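-- pv_equiv track=rewrite | github.com/liupig/TipsAndExamples | statistics_ut.py | checkTestCase
-- ===== SOURCE A (Python) =====
-- def checkTestCase(testCaseClassText):
--     begin = False
--     num = 0
--     for text in testCaseClassText.split("\n"):
--         text = text.replace("\n", "").strip()
--         if begin:
--             if text and (not text.startswith("#") and not text.startswith("pass") and not text.startswith(
--                     "print") and not text.startswith("def")):
--                 num += 1
--         else:
--             if text.startswith("def"):
--                 begin = True
--
--     return num
-- ===== SOURCE B (Python) =====
-- def checkTestCase(testCaseClassText):
--     # Back-to-front pass: cnt = qualifying lines strictly after the current one;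
--     # whenever we meet a 'def' line, the answer becomes the current suffix count.
--     # The last such recording corresponds to the FIRST 'def' from the front.
--     cnt = 0
--     ans = 0
--     for ln in reversed(testCaseClassText.split("\n")):
--         ln = ln.strip()
--         if ln.startswith("def"):
--             ans = cnt
--         if ln and not ln.startswith(("#", "pass", "print", "def")):
--             cnt += 1
--     return ans
-- ===== Notes on version B (the rewrite author's own statement) =====
-- stated objective: alternative
-- what changed: Replaced A's forward boolean state machine with a reverse (back-to-front) pass that keeps a running count of qualifying lines in the suffix and records it at each function-header line, so the last recording (the first such header from the front) is the answer; no flag, no boundary search, and A's redundant newline-replace disappears.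
import Mathlib
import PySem

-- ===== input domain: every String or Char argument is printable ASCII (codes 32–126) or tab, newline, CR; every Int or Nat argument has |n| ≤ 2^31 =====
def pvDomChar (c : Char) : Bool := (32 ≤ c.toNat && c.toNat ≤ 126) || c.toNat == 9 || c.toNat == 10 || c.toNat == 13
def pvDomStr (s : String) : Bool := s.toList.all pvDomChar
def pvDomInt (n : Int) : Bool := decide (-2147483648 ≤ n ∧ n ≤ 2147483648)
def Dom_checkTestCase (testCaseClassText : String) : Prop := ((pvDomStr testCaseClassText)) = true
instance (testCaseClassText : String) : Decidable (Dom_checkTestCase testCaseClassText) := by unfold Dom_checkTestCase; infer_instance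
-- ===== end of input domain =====

-- B replaces A's forward boolean state machine with a back-to-front pass keeping a
-- running suffix count, recorded at each function-header line — objective: alternative.

-- ===== PORT A =====
def checkTestCase (testCaseClassText : String) : Int :=
  ((((PySem.Str.split? testCaseClassText "\n").getD []).foldl
      (fun (st : Bool × Int) text =>
        let text := PySem.Str.strip (PySem.Str.replace text "\n" "")
        if st.1 then
          if text != "" && !PySem.Str.startswith text "#" && !PySem.Str.startswith text "pass"
              && !PySem.Str.startswith text "print" && !PySem.Str.startswith text "def" then
            (st.1, st.2 + 1)
          else st
        else
          if PySem.Str.startswith text "def" then (true, st.2) else st)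
      (false, 0))).2

-- ===== PORT B =====
def checkTestCase_alt (testCaseClassText : String) : Int :=
  ((((PySem.Str.split? testCaseClassText "\n").getD []).reverse.foldl
      (fun (st : Int × Int) ln =>
        let ln := PySem.Str.strip ln
        let ans := if PySem.Str.startswith ln "def" then st.1 else st.2
        let cnt := if ln != "" && !(PySem.Str.startswith ln "#" || PySem.Str.startswith ln "pass"
            || PySem.Str.startswith ln "print" || PySem.Str.startswith ln "def") then st.1 + 1 else st.1
        (cnt, ans))
      (0, 0))).2

-- ===== PRECONDITION & SPEC =====
def Spec_checkTestCase (testCaseClassText : String) (out : Int) : Prop := out = checkTestCase_alt testCaseClassText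
instance (testCaseClassText : String) (out : Int) : Decidable (Spec_checkTestCase testCaseClassText out) := by unfold Spec_checkTestCase; infer_instance

-- ===== CLAIM (what is proved, stated in full; the proofs are below) =====
def Claim_equal_checkTestCase : Prop := ∀ (testCaseClassText : String), Dom_checkTestCase testCaseClassText → Spec_checkTestCase testCaseClassText (checkTestCase testCaseClassText)

-- ===== LEMMAS AND PROOFS =====

-- replace.go on a string free of the (single) character being replaced is the identity
theorem pv_replace_go_free (c : Char) (new : List Char) :
    ∀ (fuel : Nat) (l acc : List Char), c ∉ l →
      PySem.Chars.replace.go [c] new fuel l acc = acc.reverse ++ l := by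
  intro fuel
  induction fuel with
  | zero => intro l acc _; rfl
  | succ n ih =>
      intro l acc hl
      cases l with
      | nil => simp [PySem.Chars.replace.go]
      | cons h t =>
          have hne : h ≠ c := fun he => hl (he ▸ List.mem_cons_self)
          have hpf : [c].isPrefixOf (h :: t) = false := by
            simp [List.isPrefixOf]
            intro he; exact absurd he.symm hne
          rw [PySem.Chars.replace.go, if_neg (by simp [hpf])]
          rw [ih t (h :: acc) (fun hm => hl (List.mem_cons_of_mem _ hm))]
          simp

theorem pv_replace_free (c : Char) (cs : List Char) (h : c ∉ cs) :
    PySem.Chars.replace cs [c] [] = cs := by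
  rw [PySem.Chars.replace, if_neg (by simp)]
  simpa using pv_replace_go_free c [] cs.length cs [] h

-- every piece produced by splitOn with single-character separator c is c-free
theorem pv_splitOn_go_free (c : Char) :
    ∀ (fuel : Nat) (l cur : List Char) (acc : List (List Char)),
      l.length < fuel → c ∉ cur → (∀ p ∈ acc, c ∉ p) →
      ∀ p ∈ PySem.Chars.splitOn.go [c] fuel l cur acc, c ∉ p := by
  intro fuel
  induction fuel with
  | zero => intro l cur acc h; omega
  | succ n ih =>
      intro l cur acc _hlt hcur hacc
      cases l with
      | nil =>
          intro p hp
          simp only [PySem.Chars.splitOn.go] at hp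
          simp at hp
          rcases hp with h | h
          · exact hacc _ h
          · subst h; simpa using hcur
      | cons h t =>
          by_cases hc : h = c
          · have hpf : [c].isPrefixOf (h :: t) = true := by simp [List.isPrefixOf, hc]
            intro p hp
            rw [PySem.Chars.splitOn.go, if_pos hpf] at hp
            have := ih t [] ((cur.reverse) :: acc) (by simpa using Nat.lt_of_succ_lt_succ _hlt)
              (by simp)
              (by intro q hq; rcases List.mem_cons.mp hq with h' | h'
                  · subst h'; simpa using hcur
                  · exact hacc _ h')
            simpa using this _ hp
          · have hpf : [c].isPrefixOf (h :: t) = false := by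
              simp [List.isPrefixOf]; intro he; exact absurd he.symm hc
            intro p hp
            rw [PySem.Chars.splitOn.go, if_neg (by simp [hpf])] at hp
            exact ih t (h :: cur) acc (by simpa using Nat.lt_of_succ_lt_succ _hlt)
              (by simp [hcur]; exact fun he => hc he.symm) hacc _ hp

theorem pv_splitOn_free (c : Char) (s : List Char) :
    ∀ p ∈ PySem.Chars.splitOn s [c], c ∉ p := by
  rw [PySem.Chars.splitOn]
  exact pv_splitOn_go_free c (s.length + 1) s [] [] (by omega) (by simp) (by simp)

-- A's per-line condition equals B's
theorem pv_keep_eq (a b c d e : Bool) :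
    (a && !b && !c && !d && !e) = (a && !(b || c || d || e)) := by
  cases a <;> cases b <;> cases c <;> cases d <;> cases e <;> rfl

-- the state machine with begin = true counts the kept lines
theorem pv_fold_true (keep : String → Bool) (isdef : String → Bool) :
    ∀ (ls : List String) (n : Int),
      (ls.foldl
        (fun (st : Bool × Int) t =>
          if st.1 then (if keep t then (st.1, st.2 + 1) else st)
          else (if isdef t then (true, st.2) else st))
        (true, n))
      = (true, n + ((ls.filter keep).length : Int)) := by
  intro ls
  induction ls with
  | nil => intro n; simp
  | cons h t ih =>
      intro n
      by_cases hk : keep h = true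
      · simp [List.foldl_cons, hk, ih]; ring
      · simp [List.foldl_cons, hk, ih]

-- A's full state machine equals: find the first def line, count kept lines after it
theorem pv_fold_false (keep : String → Bool) (isdef : String → Bool) :
    ∀ (ls : List String),
      ((ls.foldl
        (fun (st : Bool × Int) t =>
          if st.1 then (if keep t then (st.1, st.2 + 1) else st)
          else (if isdef t then (true, st.2) else st))
        (false, 0))).2
      = (match ls.findIdx? isdef with
         | none => (0 : Int)
         | some i => (((ls.drop (i + 1)).filter keep).length : Int)) := by
  intro ls
  induction ls with
  | nil => simp
  | cons h t ih =>
      by_cases hd : isdef h = true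
      · simp [List.foldl_cons, hd, List.findIdx?_cons, pv_fold_true keep isdef t 0]
      · have hd' : isdef h = false := by simpa using hd
        simp only [List.foldl_cons, List.findIdx?_cons, hd', Bool.false_eq_true, if_false, ih]
        cases t.findIdx? isdef <;> simp

-- B's reverse fold, read as a foldr, computes (total kept count, same characterization)
theorem pv_fold_rev (keep : String → Bool) (isdef : String → Bool) :
    ∀ (ls : List String),
      (ls.foldr
        (fun t (st : Int × Int) =>
          ((if keep t then st.1 + 1 else st.1), (if isdef t then st.1 else st.2)))
        (0, 0))
      = (((ls.filter keep).length : Int),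
         (match ls.findIdx? isdef with
          | none => (0 : Int)
          | some i => (((ls.drop (i + 1)).filter keep).length : Int))) := by
  intro ls
  induction ls with
  | nil => simp
  | cons h t ih =>
      rw [List.foldr_cons, ih]
      by_cases hd : isdef h = true
      · by_cases hk : keep h = true
        · simp [hd, hk, List.findIdx?_cons]
        · simp [hd, hk, List.findIdx?_cons]
      · have hd' : isdef h = false := by simpa using hd
        by_cases hk : keep h = true
        · simp only [hd', Bool.false_eq_true, if_false, hk, if_true, List.findIdx?_cons,
            List.filter_cons, Prod.mk.injEq]
          constructor
          · simp
          · cases t.findIdx? isdef <;> simp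
        · simp only [hd', Bool.false_eq_true, hk, if_false, List.findIdx?_cons,
            List.filter_cons, Prod.mk.injEq]
          constructor
          · simp
          · cases t.findIdx? isdef <;> simp

-- on every piece of the split, A's replace is the identity
theorem pv_replace_piece (s : String) :
    ∀ text ∈ (PySem.Str.split? s "\n").getD [],
      PySem.Str.replace text "\n" "" = text := by
  intro text ht
  rw [PySem.Str.split?, PySem.Chars.split?, if_neg (by decide)] at ht
  simp only [Option.getD_some, Option.map_some, List.mem_map] at ht
  obtain ⟨cs, hcs, rfl⟩ := ht
  have hfree : '\n' ∉ cs := pv_splitOn_free '\n' s.toList cs (by simpa using hcs)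
  rw [PySem.Str.replace]
  have h1 : ("\n" : String).toList = ['\n'] := by decide
  have h2 : ("" : String).toList = [] := by decide
  rw [h1, h2, String.toList_ofList, pv_replace_free '\n' cs hfree]

-- ===== VERDICT (by name: the statement is the Claim_ definition above) =====
theorem checkTestCase_spec : Claim_equal_checkTestCase := by
  intro s _
  unfold Spec_checkTestCase checkTestCase checkTestCase_alt
  set L := (PySem.Str.split? s "\n").getD [] with hL
  -- drop A's redundant replace on each split piece
  rw [PySem.List.foldl_congr_mem L _
      (fun (st : Bool × Int) t =>
        if st.1 then
          (if (PySem.Str.strip t != "" && !PySem.Str.startswith (PySem.Str.strip t) "#"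
              && !PySem.Str.startswith (PySem.Str.strip t) "pass"
              && !PySem.Str.startswith (PySem.Str.strip t) "print"
              && !PySem.Str.startswith (PySem.Str.strip t) "def") then (st.1, st.2 + 1) else st)
        else (if PySem.Str.startswith (PySem.Str.strip t) "def" then (true, st.2) else st))
      (false, 0)
      (by intro acc x hx; simp only [pv_replace_piece s x (hL ▸ hx)])]
  rw [pv_fold_false
      (fun t => PySem.Str.strip t != "" && !PySem.Str.startswith (PySem.Str.strip t) "#"
        && !PySem.Str.startswith (PySem.Str.strip t) "pass"
        && !PySem.Str.startswith (PySem.Str.strip t) "print"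
        && !PySem.Str.startswith (PySem.Str.strip t) "def")
      (fun t => PySem.Str.startswith (PySem.Str.strip t) "def") L]
  rw [List.foldl_reverse]
  have hB := pv_fold_rev
      (fun t => PySem.Str.strip t != "" && !(PySem.Str.startswith (PySem.Str.strip t) "#"
        || PySem.Str.startswith (PySem.Str.strip t) "pass"
        || PySem.Str.startswith (PySem.Str.strip t) "print"
        || PySem.Str.startswith (PySem.Str.strip t) "def"))
      (fun t => PySem.Str.startswith (PySem.Str.strip t) "def") L
  simp only [] at hB ⊢
  rw [hB]
  simp only [pv_keep_eq]
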